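-- pv_equiv track=rewrite | github.com/DogginitAN/wunderbots | tts.py | build_expert_voice_map
-- ===== SOURCE A (Python) =====
-- GUIDE_VOICES = {
--     # Nova — confident, warm, leader energy
--     "nova": "rRiIQLylyhtZZrjx61F1",     # Custom — curious adventurous young girl, warm leader energy
--     # Bolt — energetic, playful, kid-like
--     "bolt": "2f1b6Q2ICKpLzWrEEYVE",     # Custom voice — energetic goofy cartoon boy, lovable sidekick
--     # Pip — soft, gentle, thoughtful
--     "pip": "cN9lACJjByQco3FyvGzE",       # Custom voice — soft, gentle, whimsical fairy/owl character
-- }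
--
-- EXPERT_VOICES_FEMALE = [
--     "67oeJmj7jIMsdE6yXPr5",   # Custom F1 — warm mentor, Ms. Frizzle energy
--     "ZT9u07TYPVl83ejeLakq",   # Custom F2 — cool calm scientist
--     "y5LC9pxhb6k0W8IrQUXS",   # Custom F3 — energetic adventurer
--     "0rEo3eAjssGDUCXHYENf",   # Custom F4 — gentle grandmother storyteller
-- ]
--
-- EXPERT_VOICES_MALE = [
--     "MDLAMJ0jxkpYkjXbmG4t",   # Custom M1 — booming enthusiast, jolly and dramatic
--     "g2W4HAjKvdW93AmsjsOx",   # Custom M2 — nerdy professor, quick-talking and fascinated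
--     "Fz7HYdHHCP1EF1FLn46C",   # Custom M3 — laid-back guide, smooth and chill
--     "n1PvBOwxb8X6m7tahp2h",   # Custom M4 — dramatic storyteller, theatrical and epic
-- ]
--
-- EXPERT_VOICE_POOL = EXPERT_VOICES_FEMALE + EXPERT_VOICES_MALE
--
-- def build_expert_voice_map(characters: dict) -> dict:
--     """Build a character_id → voice_id map for an episode's characters.
--
--     Uses the expert's gender field to pick from the right voice pool.
--     Falls back to the combined pool if gender isn't specified.
--     """
--     voice_map = {}
--     female_idx = 0
--     male_idx = 0
--     fallback_idx = 0
--
--     for char_id, char in characters.items():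
--         if char_id in GUIDE_VOICES:
--             voice_map[char_id] = GUIDE_VOICES[char_id]
--         else:
--             gender = char.get("gender", "").lower() if isinstance(char, dict) else ""
--             if gender == "female":
--                 voice_map[char_id] = EXPERT_VOICES_FEMALE[female_idx % len(EXPERT_VOICES_FEMALE)]
--                 female_idx += 1
--             elif gender == "male":
--                 voice_map[char_id] = EXPERT_VOICES_MALE[male_idx % len(EXPERT_VOICES_MALE)]
--                 male_idx += 1
--             else:
--                 # No gender specified — use combined pool
--                 voice_map[char_id] = EXPERT_VOICE_POOL[fallback_idx % len(EXPERT_VOICE_POOL)]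
--                 fallback_idx += 1
--
--     return voice_map
-- ===== SOURCE B (Python) =====
-- GUIDE_VOICES = {
--     "nova": "rRiIQLylyhtZZrjx61F1",
--     "bolt": "2f1b6Q2ICKpLzWrEEYVE",
--     "pip": "cN9lACJjByQco3FyvGzE",
-- }
--
-- EXPERT_VOICES_FEMALE = [
--     "67oeJmj7jIMsdE6yXPr5",
--     "ZT9u07TYPVl83ejeLakq",
--     "y5LC9pxhb6k0W8IrQUXS",
--     "0rEo3eAjssGDUCXHYENf",
-- ]
--
-- EXPERT_VOICES_MALE = [
--     "MDLAMJ0jxkpYkjXbmG4t",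
--     "g2W4HAjKvdW93AmsjsOx",
--     "Fz7HYdHHCP1EF1FLn46C",
--     "n1PvBOwxb8X6m7tahp2h",
-- ]
--
-- EXPERT_VOICE_POOL = EXPERT_VOICES_FEMALE + EXPERT_VOICES_MALE
--
-- POOLS = {
--     "female": EXPERT_VOICES_FEMALE,
--     "male": EXPERT_VOICES_MALE,
--     "other": EXPERT_VOICE_POOL,
-- }
--
--
-- def build_expert_voice_map(characters: dict) -> dict:
--     """Classify each character into a category first, number every entry with
--     its occurrence index within its own category, then map each entry to its
--     voice by table lookup."""
--     cats = []
--     for char_id, char in characters.items():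
--         if char_id in GUIDE_VOICES:
--             cats.append((char_id, "guide"))
--         else:
--             gender = char.get("gender", "").lower() if isinstance(char, dict) else ""
--             cats.append((char_id, gender if gender in ("female", "male") else "other"))
--     seen = {}
--     idx = []
--     for _, cat in cats:
--         k = seen.get(cat, 0)
--         idx.append(k)
--         seen[cat] = k + 1
--     return {
--         cid: GUIDE_VOICES[cid] if cat == "guide" else POOLS[cat][k % len(POOLS[cat])]
--         for (cid, cat), k in zip(cats, idx)
--     }
-- ===== Notes on version B (the rewrite author's own statement) =====
-- stated objective: alternative
-- what changed: replaces A's single pass with three mutable counters and a branch ladder by three passes: classify each character into a category, number every entry with its occurrence index within its category via one generic dict scan, then build the map by table lookup over zip(cats, idx)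
import Mathlib
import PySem

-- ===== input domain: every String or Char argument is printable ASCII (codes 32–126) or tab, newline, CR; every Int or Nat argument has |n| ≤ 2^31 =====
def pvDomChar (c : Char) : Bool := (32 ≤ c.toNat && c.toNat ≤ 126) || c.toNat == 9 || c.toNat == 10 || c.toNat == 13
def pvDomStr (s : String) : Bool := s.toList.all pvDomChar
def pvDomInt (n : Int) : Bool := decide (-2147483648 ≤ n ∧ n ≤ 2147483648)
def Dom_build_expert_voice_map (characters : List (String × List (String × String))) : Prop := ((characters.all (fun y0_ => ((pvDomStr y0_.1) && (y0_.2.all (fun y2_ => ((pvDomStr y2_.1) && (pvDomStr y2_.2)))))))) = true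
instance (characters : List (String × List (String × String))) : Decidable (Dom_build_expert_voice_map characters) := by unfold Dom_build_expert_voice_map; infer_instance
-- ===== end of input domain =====

-- B replaces A's single pass with three mutable counters and a branch ladder by three passes —
-- classify, number each entry within its category via one generic dict scan, assign by table lookup — same return value (alternative decomposition).

-- ===== PORT A =====
def pvGuides : PySem.Dict String String :=
  PySem.Dict.ofList [("nova", "rRiIQLylyhtZZrjx61F1"), ("bolt", "2f1b6Q2ICKpLzWrEEYVE"), ("pip", "cN9lACJjByQco3FyvGzE")]
def pvFem : List String :=
  ["67oeJmj7jIMsdE6yXPr5", "ZT9u07TYPVl83ejeLakq", "y5LC9pxhb6k0W8IrQUXS", "0rEo3eAjssGDUCXHYENf"]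
def pvMale : List String :=
  ["MDLAMJ0jxkpYkjXbmG4t", "g2W4HAjKvdW93AmsjsOx", "Fz7HYdHHCP1EF1FLn46C", "n1PvBOwxb8X6m7tahp2h"]
def pvPool : List String := pvFem ++ pvMale

-- A's loop.  Counters stay ≥ 0, so Nat; `pool[i % len(pool)]` always has i % len < len, so
-- List.getD is exact there; `isinstance(char, dict)` is always true under this typing, so
-- the gender expression is the then-branch; GUIDE_VOICES[char_id] after a successful `in` is the matched value.
def pvALoop : List (String × List (String × String)) → PySem.Dict String String → Nat → Nat → Nat → PySem.Dict String String
  | [], vm, _, _, _ => vm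
  | (cid, ch) :: rest, vm, fi, mi, oi =>
    match PySem.Dict.get? pvGuides cid with
    | some v => pvALoop rest (PySem.Dict.insert vm cid v) fi mi oi
    | none =>
      let g := PySem.Str.lower (PySem.Dict.getD (PySem.Dict.ofList ch) "gender" "")
      if g = "female" then pvALoop rest (PySem.Dict.insert vm cid (pvFem.getD (fi % 4) "")) (fi + 1) mi oi
      else if g = "male" then pvALoop rest (PySem.Dict.insert vm cid (pvMale.getD (mi % 4) "")) fi (mi + 1) oi
      else pvALoop rest (PySem.Dict.insert vm cid (pvPool.getD (oi % 8) "")) fi mi (oi + 1)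

def build_expert_voice_map (characters : List (String × List (String × String))) : List (String × String) :=
  (pvALoop characters PySem.Dict.empty 0 0 0).items

-- ===== PORT B =====
-- classification of one character (the body of B's first loop)
def pvCat (cid : String) (ch : List (String × String)) : String :=
  if PySem.Dict.contains pvGuides cid then "guide"
  else
    let gender := PySem.Str.lower (PySem.Dict.getD (PySem.Dict.ofList ch) "gender" "")
    if gender = "female" ∨ gender = "male" then gender else "other"

-- the POOLS table (lookup by category; "other" is the only remaining key)
def pvPoolOf (cat : String) : List String :=
  if cat = "female" then pvFem else if cat = "male" then pvMale else pvPool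

-- B's second loop: occurrence index of each classified entry within its own category
-- (`seen.get(cat, 0)` / `seen[cat] = k + 1`); counters stay ≥ 0, so Nat
def pvIdxFrom : List (String × String) → PySem.Dict String Nat → List Nat
  | [], _ => []
  | (_, cat) :: rest, seen =>
    let k := PySem.Dict.getD seen cat 0
    k :: pvIdxFrom rest (PySem.Dict.insert seen cat (k + 1))

-- pool index k % len is in range, so getD is exact; GUIDE_VOICES[cid] with cat = "guide"
-- is the present value, so get?.getD "" is exact
def build_expert_voice_map_alt (characters : List (String × List (String × String))) : List (String × String) :=
  let cats := characters.map (fun p => (p.1, pvCat p.1 p.2))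
  let idx := pvIdxFrom cats PySem.Dict.empty
  ((cats.zip idx).foldl
    (fun vm e =>
      PySem.Dict.insert vm e.1.1
        (if e.1.2 = "guide" then (PySem.Dict.get? pvGuides e.1.1).getD ""
         else
           let pool := pvPoolOf e.1.2
           pool.getD (e.2 % pool.length) ""))
    PySem.Dict.empty).items

-- ===== PRECONDITION & SPEC =====
-- Pre_ restricts to association lists with pairwise-distinct character ids: the argument is a
-- Python dict, whose key sequence is always duplicate-free, so no Python call is excluded.
def Pre_build_expert_voice_map (characters : List (String × List (String × String))) : Prop :=
  (characters.map (·.1)).Nodup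
instance (characters : List (String × List (String × String))) : Decidable (Pre_build_expert_voice_map characters) := by unfold Pre_build_expert_voice_map; infer_instance

def pvWitness_build_expert_voice_map : (List (String × List (String × String))) :=
  [("nova", []), ("alice", [("gender", "Female")]), ("bob", [("gender", "male")]), ("carol", [("name", "c")])]

def Spec_build_expert_voice_map (characters : List (String × List (String × String))) (out : List (String × String)) : Prop := out = build_expert_voice_map_alt characters
instance (characters : List (String × List (String × String))) (out : List (String × String)) : Decidable (Spec_build_expert_voice_map characters out) := by unfold Spec_build_expert_voice_map; infer_instance

-- ===== CLAIM (what is proved, stated in full; the proofs are below) =====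
def Claim_equal_build_expert_voice_map : Prop := ∀ (characters : List (String × List (String × String))), Dom_build_expert_voice_map characters → Pre_build_expert_voice_map characters → Spec_build_expert_voice_map characters (build_expert_voice_map characters)

-- ===== LEMMAS AND PROOFS =====

-- common single-pass form: A's loop expressed over the classified list
def pvMid : List (String × String) → PySem.Dict String String → Nat → Nat → Nat → PySem.Dict String String
  | [], vm, _, _, _ => vm
  | (cid, cat) :: rest, vm, fi, mi, oi =>
    if cat = "guide" then pvMid rest (PySem.Dict.insert vm cid ((PySem.Dict.get? pvGuides cid).getD "")) fi mi oi
    else if cat = "female" then pvMid rest (PySem.Dict.insert vm cid (pvFem.getD (fi % 4) "")) (fi + 1) mi oi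
    else if cat = "male" then pvMid rest (PySem.Dict.insert vm cid (pvMale.getD (mi % 4) "")) fi (mi + 1) oi
    else pvMid rest (PySem.Dict.insert vm cid (pvPool.getD (oi % 8) "")) fi mi (oi + 1)

lemma pvCat_range (cid : String) (ch : List (String × String)) :
    pvCat cid ch = "guide" ∨ pvCat cid ch = "female" ∨ pvCat cid ch = "male" ∨ pvCat cid ch = "other" := by
  unfold pvCat
  by_cases h1 : PySem.Dict.contains pvGuides cid = true
  · simp [h1]
  · simp only [h1]
    by_cases h2 : PySem.Str.lower (PySem.Dict.getD (PySem.Dict.ofList ch) "gender" "") = "female" ∨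
        PySem.Str.lower (PySem.Dict.getD (PySem.Dict.ofList ch) "gender" "") = "male"
    · rcases h2 with h | h <;> simp [h]
    · simp [h2]

lemma pvALoop_eq_mid (cs : List (String × List (String × String)))
    (vm : PySem.Dict String String) (fi mi oi : Nat) :
    pvALoop cs vm fi mi oi = pvMid (cs.map (fun p => (p.1, pvCat p.1 p.2))) vm fi mi oi := by
  induction cs generalizing vm fi mi oi with
  | nil => rfl
  | cons hd rest ih =>
    obtain ⟨cid, ch⟩ := hd
    simp only [pvALoop, List.map_cons]
    cases h : PySem.Dict.get? pvGuides cid with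
    | some v =>
      have hc : PySem.Dict.contains pvGuides cid = true := by
        rw [PySem.Dict.contains_eq_isSome_get?, h]; rfl
      have hcat : pvCat cid ch = "guide" := by simp [pvCat, hc]
      simp only [hcat, pvMid, h, Option.getD_some]
      exact ih _ _ _ _
    | none =>
      have hc : PySem.Dict.contains pvGuides cid = true ↔ False := by
        rw [PySem.Dict.contains_eq_isSome_get?, h]; simp
      set g := PySem.Str.lower (PySem.Dict.getD (PySem.Dict.ofList ch) "gender" "") with hg
      by_cases hf : g = "female"
      · have hcat : pvCat cid ch = "female" := by simp [pvCat, hc, ← hg, hf]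
        rw [hcat, if_pos hf]
        simp only [pvMid, if_neg (by decide : ¬ ("female" : String) = "guide")]
        exact ih _ _ _ _
      · by_cases hm : g = "male"
        · have hcat : pvCat cid ch = "male" := by simp [pvCat, hc, ← hg, hm]
          rw [hcat, if_neg hf, if_pos hm]
          simp only [pvMid, if_neg (by decide : ¬ ("male" : String) = "guide"),
            if_neg (by decide : ¬ ("male" : String) = "female")]
          exact ih _ _ _ _
        · have hcat : pvCat cid ch = "other" := by
            simp [pvCat, hc, ← hg, hf, hm]
          rw [hcat, if_neg hf, if_neg hm]
          simp only [pvMid, if_neg (by decide : ¬ ("other" : String) = "guide"),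
            if_neg (by decide : ¬ ("other" : String) = "female"),
            if_neg (by decide : ¬ ("other" : String) = "male")]
          exact ih _ _ _ _

lemma pvMid_eq_zipfold (todo : List (String × String))
    (hall : ∀ p ∈ todo, p.2 = "guide" ∨ p.2 = "female" ∨ p.2 = "male" ∨ p.2 = "other")
    (vm : PySem.Dict String String) (seen : PySem.Dict String Nat) :
    pvMid todo vm (seen.getD "female" 0) (seen.getD "male" 0) (seen.getD "other" 0)
      = ((todo.zip (pvIdxFrom todo seen)).foldl
          (fun vm e =>
            PySem.Dict.insert vm e.1.1
              (if e.1.2 = "guide" then (PySem.Dict.get? pvGuides e.1.1).getD ""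
               else
                 let pool := pvPoolOf e.1.2
                 pool.getD (e.2 % pool.length) ""))
          vm) := by
  induction todo generalizing vm seen with
  | nil => simp [pvMid, pvIdxFrom]
  | cons hd rest ih =>
    obtain ⟨cid, cat⟩ := hd
    have hrest : ∀ p ∈ rest, p.2 = "guide" ∨ p.2 = "female" ∨ p.2 = "male" ∨ p.2 = "other" :=
      fun p hp => hall p (List.mem_cons_of_mem _ hp)
    simp only [pvIdxFrom, List.zip_cons_cons, List.foldl_cons]
    rcases hall (cid, cat) List.mem_cons_self with h | h | h | h <;> subst h
    · -- guide
      simp only [pvMid, String.reduceEq, reduceIte]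
      have h := ih hrest (PySem.Dict.insert vm cid ((PySem.Dict.get? pvGuides cid).getD ""))
        (seen.insert "guide" (seen.getD "guide" 0 + 1))
      rw [PySem.Dict.getD_insert_of_ne seen (seen.getD "guide" 0 + 1) 0 (show ("female" : String) ≠ "guide" by decide),
        PySem.Dict.getD_insert_of_ne seen (seen.getD "guide" 0 + 1) 0 (show ("male" : String) ≠ "guide" by decide),
        PySem.Dict.getD_insert_of_ne seen (seen.getD "guide" 0 + 1) 0 (show ("other" : String) ≠ "guide" by decide)] at h
      exact h
    · -- female
      have hpool : pvPoolOf "female" = pvFem := by simp [pvPoolOf]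
      simp only [pvMid, String.reduceEq, reduceIte, hpool, show (pvFem : List String).length = 4 from rfl]
      have h := ih hrest (PySem.Dict.insert vm cid (pvFem.getD (seen.getD "female" 0 % 4) ""))
        (seen.insert "female" (seen.getD "female" 0 + 1))
      rw [PySem.Dict.getD_insert_self seen "female" (seen.getD "female" 0 + 1) 0,
        PySem.Dict.getD_insert_of_ne seen (seen.getD "female" 0 + 1) 0 (show ("male" : String) ≠ "female" by decide),
        PySem.Dict.getD_insert_of_ne seen (seen.getD "female" 0 + 1) 0 (show ("other" : String) ≠ "female" by decide)] at h
      exact h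
    · -- male
      have hpool : pvPoolOf "male" = pvMale := by simp [pvPoolOf]
      simp only [pvMid, String.reduceEq, reduceIte, hpool, show (pvMale : List String).length = 4 from rfl]
      have h := ih hrest (PySem.Dict.insert vm cid (pvMale.getD (seen.getD "male" 0 % 4) ""))
        (seen.insert "male" (seen.getD "male" 0 + 1))
      rw [PySem.Dict.getD_insert_self seen "male" (seen.getD "male" 0 + 1) 0,
        PySem.Dict.getD_insert_of_ne seen (seen.getD "male" 0 + 1) 0 (show ("female" : String) ≠ "male" by decide),
        PySem.Dict.getD_insert_of_ne seen (seen.getD "male" 0 + 1) 0 (show ("other" : String) ≠ "male" by decide)] at h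
      exact h
    · -- other
      have hpool : pvPoolOf "other" = pvPool := by simp [pvPoolOf]
      simp only [pvMid, String.reduceEq, reduceIte, hpool, show (pvPool : List String).length = 8 from rfl]
      have h := ih hrest (PySem.Dict.insert vm cid (pvPool.getD (seen.getD "other" 0 % 8) ""))
        (seen.insert "other" (seen.getD "other" 0 + 1))
      rw [PySem.Dict.getD_insert_self seen "other" (seen.getD "other" 0 + 1) 0,
        PySem.Dict.getD_insert_of_ne seen (seen.getD "other" 0 + 1) 0 (show ("female" : String) ≠ "other" by decide),
        PySem.Dict.getD_insert_of_ne seen (seen.getD "other" 0 + 1) 0 (show ("male" : String) ≠ "other" by decide)] at h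
      exact h

-- ===== VERDICT (by name: the statement is the Claim_ definition above) =====
theorem build_expert_voice_map_spec : Claim_equal_build_expert_voice_map := by
  intro characters _hdom _hpre
  unfold Spec_build_expert_voice_map build_expert_voice_map build_expert_voice_map_alt
  rw [pvALoop_eq_mid]
  have h := pvMid_eq_zipfold (characters.map (fun p => (p.1, pvCat p.1 p.2)))
    (by
      intro p hp
      simp only [List.mem_map] at hp
      obtain ⟨q, _, rfl⟩ := hp
      exact pvCat_range q.1 q.2)
    PySem.Dict.empty PySem.Dict.empty
  simp only [PySem.Dict.getD_empty] at h
  simpa using congrArg PySem.Dict.items h
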